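-- pv_equiv track=rewrite | github.com/alexandraback/datacollection | solutions_5686313294495744_0/Python/aggelgian/C.py | solve
-- ===== SOURCE A (Python) =====
-- from  collections import defaultdict
--
-- def solve(n, ls):
--   d1, d2 = defaultdict(int), defaultdict(int)
--   d1F, d2F = defaultdict(lambda: False), defaultdict(lambda: False)
--   n = 0
--   for l in ls:
--     d1[l[0]] += 1
--     d2[l[1]] += 1
--   for l in ls:
--     l1, l2 = l[0], l[1]
--     if d1[l1] > 1 and d2[l2] > 1 and d1F[l1] and d2F[l2]:
--       n += 1
--     d1F[l1] = True
--     d2F[l2] = True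
--   return n
-- ===== SOURCE B (Python) =====
-- def solve(n, ls):
--     # complement count: answer = len(ls) minus the number of positions that are
--     # the first occurrence of their row value or the first occurrence of their col value
--     fr, fc = {}, {}
--     for i, l in enumerate(ls):
--         fr.setdefault(l[0], i)
--         fc.setdefault(l[1], i)
--     return len(ls) - len(set(fr.values()) | set(fc.values()))
-- ===== Notes on version B (the rewrite author's own statement) =====
-- stated objective: alternative
-- what changed: A counts in a loop (count dicts plus seen-flag dicts over two passes); B counts by complement: it records the first-occurrence index of each row value and each col value via dict.setdefault and returns len(ls) minus the size of the union of those two index sets, with no per-element counter at all.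
import Mathlib
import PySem

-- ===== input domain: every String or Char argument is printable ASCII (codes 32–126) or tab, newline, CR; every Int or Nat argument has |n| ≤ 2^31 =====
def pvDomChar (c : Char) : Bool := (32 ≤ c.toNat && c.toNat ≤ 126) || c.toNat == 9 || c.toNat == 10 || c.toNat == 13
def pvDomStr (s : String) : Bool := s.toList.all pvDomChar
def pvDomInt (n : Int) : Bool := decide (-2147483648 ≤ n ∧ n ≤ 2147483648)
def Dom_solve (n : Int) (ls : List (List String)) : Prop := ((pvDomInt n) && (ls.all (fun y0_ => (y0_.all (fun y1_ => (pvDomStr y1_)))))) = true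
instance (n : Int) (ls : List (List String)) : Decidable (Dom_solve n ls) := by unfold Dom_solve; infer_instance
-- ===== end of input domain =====

-- B counts by complement (len minus the union of first-occurrence index sets) instead of A's
-- two-pass count-dicts-plus-seen-flags loop (objective: alternative).

-- ===== PORT A =====
-- l[0] / l[1]; Pre_solve keeps the index in range, so the .getD "" default is never used
def pvIdx (l : List String) (i : Int) : String := (PySem.List.pyGet? l i).getD ""

def stepA (d1 d2 : PySem.Dict String Int)
    (st : Int × PySem.Dict String Bool × PySem.Dict String Bool) (l : List String) :
    Int × PySem.Dict String Bool × PySem.Dict String Bool :=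
  let l1 := pvIdx l 0
  let l2 := pvIdx l 1
  ((if 1 < d1.getD l1 0 ∧ 1 < d2.getD l2 0 ∧ st.2.1.getD l1 false = true ∧ st.2.2.getD l2 false = true
      then st.1 + 1 else st.1),
    st.2.1.insert l1 true, st.2.2.insert l2 true)

def solve (n : Int) (ls : List (List String)) : Int :=
  let d1 : PySem.Dict String Int :=
    ls.foldl (fun d l => d.modify (pvIdx l 0) 0 (· + 1)) PySem.Dict.empty
  let d2 : PySem.Dict String Int :=
    ls.foldl (fun d l => d.modify (pvIdx l 1) 0 (· + 1)) PySem.Dict.empty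
  (ls.foldl (stepA d1 d2) (0, PySem.Dict.empty, PySem.Dict.empty)).1

-- ===== PORT B =====
-- for i, l in enumerate(ls): fr.setdefault(l[0], i); fc.setdefault(l[1], i)
-- return len(ls) - len(set(fr.values()) | set(fc.values()))
def solve_alt (n : Int) (ls : List (List String)) : Int :=
  let st := (PySem.List.enumerate ls).foldl
    (fun (st : PySem.Dict String Int × PySem.Dict String Int) p =>
      (st.1.setdefault (pvIdx p.2 0) p.1, st.2.setdefault (pvIdx p.2 1) p.1))
    (PySem.Dict.empty, PySem.Dict.empty)
  (ls.length : Int) -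
    PySem.Set.len (PySem.Set.union (PySem.Set.ofList st.1.values) (PySem.Set.ofList st.2.values))

-- ===== PRECONDITION & SPEC =====
-- Pre_: every row needs at least two entries, else Python A raises IndexError on l[0]/l[1]
def Pre_solve (n : Int) (ls : List (List String)) : Prop := ∀ l ∈ ls, 2 ≤ l.length
instance (n : Int) (ls : List (List String)) : Decidable (Pre_solve n ls) := by unfold Pre_solve; infer_instance
def pvWitness_solve : Int × List (List String) := (0, [["a","x"],["a","x"],["b","x"]])

def Spec_solve (n : Int) (ls : List (List String)) (out : Int) : Prop := out = solve_alt n ls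
instance (n : Int) (ls : List (List String)) (out : Int) : Decidable (Spec_solve n ls out) := by unfold Spec_solve; infer_instance

-- ===== CLAIM (what is proved, stated in full; the proofs are below) =====
def Claim_equal_solve : Prop := ∀ (n : Int) (ls : List (List String)), Dom_solve n ls → Pre_solve n ls → Spec_solve n ls (solve n ls)

-- ===== LEMMAS AND PROOFS =====

-- row / column value lists
def rowsOf (ls : List (List String)) : List String := ls.map (fun l => pvIdx l 0)
def colsOf (ls : List (List String)) : List String := ls.map (fun l => pvIdx l 1)

-- proof-side middle program: one pass with two seen-sets
def midStep (st : Int × PySem.Set String × PySem.Set String) (l : List String) :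
    Int × PySem.Set String × PySem.Set String :=
  ((if pvIdx l 0 ∈ st.2.1 ∧ pvIdx l 1 ∈ st.2.2 then st.1 + 1 else st.1),
    PySem.Set.add st.2.1 (pvIdx l 0), PySem.Set.add st.2.2 (pvIdx l 1))

-- indices below n passing q, as Ints
def idxFilter (q : Nat → Bool) (n : Nat) : List Int :=
  List.map (fun i => Int.ofNat i) ((List.range n).filter q)

-- xs[i] already appeared strictly before position i
def seenAt (xs : List String) (i : Nat) : Bool := decide (xs.getD i "" ∈ xs.take i)

-- positions of first occurrences in xs
def firsts (xs : List String) : List Int := idxFilter (fun i => !seenAt xs i) xs.length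

-- positions that are a first occurrence of their row or of their col value
def uniteIdx (ls : List (List String)) : List Int :=
  idxFilter (fun i => !(seenAt (rowsOf ls) i && seenAt (colsOf ls) i)) ls.length

theorem pv_getD_count (ls : List (List String)) (i : Int) (k : String) :
    (ls.foldl (fun d l => d.modify (pvIdx l i) 0 (· + 1)) PySem.Dict.empty).getD k 0
      = ((ls.map (fun l => pvIdx l i)).count k : Int) := by
  rw [← List.foldl_map (f := fun l => pvIdx l i)
      (g := fun d x => PySem.Dict.modify d x 0 (· + 1))]
  simp [PySem.Dict.getD_foldl_modify_add_one]

theorem pv_loop_eq (ls : List (List String)) :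
    ∀ (rest p : List (List String)) (a : Int) (F1 F2 : PySem.Dict String Bool)
      (S1 S2 : PySem.Set String),
      ls = p ++ rest →
      (∀ k, (F1.getD k false = true) ↔ k ∈ S1) →
      (∀ k, k ∈ S1 ↔ k ∈ p.map (fun l => pvIdx l 0)) →
      (∀ k, (F2.getD k false = true) ↔ k ∈ S2) →
      (∀ k, k ∈ S2 ↔ k ∈ p.map (fun l => pvIdx l 1)) →
      (rest.foldl (stepA
          (ls.foldl (fun d l => d.modify (pvIdx l 0) 0 (· + 1)) PySem.Dict.empty)
          (ls.foldl (fun d l => d.modify (pvIdx l 1) 0 (· + 1)) PySem.Dict.empty))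
          (a, F1, F2)).1
        = (rest.foldl midStep (a, S1, S2)).1 := by
  intro rest
  induction rest with
  | nil => intro p a F1 F2 S1 S2 _ _ _ _ _; simp
  | cons l rest' ih =>
    intro p a F1 F2 S1 S2 hls h1 h2 h3 h4
    have hcnt1 : (pvIdx l 0 ∈ S1) →
        (1:Int) < (ls.foldl (fun d l => d.modify (pvIdx l 0) 0 (· + 1)) PySem.Dict.empty).getD (pvIdx l 0) 0 := by
      intro hm
      rw [pv_getD_count]
      have hp : pvIdx l 0 ∈ p.map (fun l => pvIdx l 0) := (h2 _).1 hm
      have h1le : 1 ≤ (p.map (fun l => pvIdx l 0)).count (pvIdx l 0) := List.one_le_count_iff.2 hp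
      have : ls.map (fun l => pvIdx l 0)
          = p.map (fun l => pvIdx l 0) ++ pvIdx l 0 :: rest'.map (fun l => pvIdx l 0) := by
        simp [hls]
      rw [this, List.count_append, List.count_cons_self]
      omega
    have hcnt2 : (pvIdx l 1 ∈ S2) →
        (1:Int) < (ls.foldl (fun d l => d.modify (pvIdx l 1) 0 (· + 1)) PySem.Dict.empty).getD (pvIdx l 1) 0 := by
      intro hm
      rw [pv_getD_count]
      have hp : pvIdx l 1 ∈ p.map (fun l => pvIdx l 1) := (h4 _).1 hm
      have h1le : 1 ≤ (p.map (fun l => pvIdx l 1)).count (pvIdx l 1) := List.one_le_count_iff.2 hp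
      have : ls.map (fun l => pvIdx l 1)
          = p.map (fun l => pvIdx l 1) ++ pvIdx l 1 :: rest'.map (fun l => pvIdx l 1) := by
        simp [hls]
      rw [this, List.count_append, List.count_cons_self]
      omega
    have hcond :
        ((1:Int) < (ls.foldl (fun d l => d.modify (pvIdx l 0) 0 (· + 1)) PySem.Dict.empty).getD (pvIdx l 0) 0 ∧
         (1:Int) < (ls.foldl (fun d l => d.modify (pvIdx l 1) 0 (· + 1)) PySem.Dict.empty).getD (pvIdx l 1) 0 ∧
         F1.getD (pvIdx l 0) false = true ∧ F2.getD (pvIdx l 1) false = true)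
        ↔ (pvIdx l 0 ∈ S1 ∧ pvIdx l 1 ∈ S2) := by
      constructor
      · rintro ⟨-, -, hf1, hf2⟩; exact ⟨(h1 _).1 hf1, (h3 _).1 hf2⟩
      · rintro ⟨hm1, hm2⟩
        exact ⟨hcnt1 hm1, hcnt2 hm2, (h1 _).2 hm1, (h3 _).2 hm2⟩
    simp only [List.foldl_cons]
    have hstep : stepA
        (ls.foldl (fun d l => d.modify (pvIdx l 0) 0 (· + 1)) PySem.Dict.empty)
        (ls.foldl (fun d l => d.modify (pvIdx l 1) 0 (· + 1)) PySem.Dict.empty)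
        (a, F1, F2) l
        = ((if pvIdx l 0 ∈ S1 ∧ pvIdx l 1 ∈ S2 then a + 1 else a),
           F1.insert (pvIdx l 0) true, F2.insert (pvIdx l 1) true) := by
      simp only [stepA]
      congr 1
      exact if_congr hcond rfl rfl
    rw [hstep]
    simp only [midStep]
    refine ih (p ++ [l]) _ _ _ _ _ (by simp [hls]) ?_ ?_ ?_ ?_
    · intro k
      rw [PySem.Dict.getD_insert, PySem.Set.mem_add]
      by_cases hk : k = pvIdx l 0 <;> simp [hk, h1 k]
    · intro k
      rw [PySem.Set.mem_add]
      simp [h2 k, or_comm]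
    · intro k
      rw [PySem.Dict.getD_insert, PySem.Set.mem_add]
      by_cases hk : k = pvIdx l 1 <;> simp [hk, h3 k]
    · intro k
      rw [PySem.Set.mem_add]
      simp [h4 k, or_comm]

theorem idxFilter_snoc (q : Nat → Bool) (n : Nat) :
    idxFilter q (n + 1) = idxFilter q n ++ (if q n then [(n : Int)] else []) := by
  simp only [idxFilter, List.range_succ, List.filter_append, List.map_append]
  split <;> simp_all

theorem idxFilter_congr {q q' : Nat → Bool} (n : Nat) (h : ∀ i < n, q i = q' i) :
    idxFilter q n = idxFilter q' n := by
  unfold idxFilter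
  rw [List.filter_congr (fun i hi => h i (List.mem_range.1 hi))]

theorem nodup_idxFilter (q : Nat → Bool) (n : Nat) : (idxFilter q n).Nodup := by
  unfold idxFilter
  exact (List.nodup_range.filter q).map (fun a b hab => Int.ofNat.inj hab)

theorem mem_idxFilter (q : Nat → Bool) (n : Nat) (x : Int) :
    x ∈ idxFilter q n ↔ ∃ i, i < n ∧ q i = true ∧ x = (i : Int) := by
  unfold idxFilter
  constructor
  · intro hx
    rcases List.mem_map.1 hx with ⟨i, hi, rfl⟩
    rcases List.mem_filter.1 hi with ⟨hr, hq⟩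
    exact ⟨i, List.mem_range.1 hr, hq, rfl⟩
  · rintro ⟨i, hi, hq, rfl⟩
    exact List.mem_map.2 ⟨i, List.mem_filter.2 ⟨List.mem_range.2 hi, hq⟩, rfl⟩

theorem seenAt_append (xs : List String) (x : String) (i : Nat) (hi : i < xs.length) :
    seenAt (xs ++ [x]) i = seenAt xs i := by
  unfold seenAt
  rw [List.getD_append _ _ _ _ hi, List.take_append_of_le_length (Nat.le_of_lt hi)]

theorem seenAt_last (xs : List String) (x : String) :
    seenAt (xs ++ [x]) xs.length = decide (x ∈ xs) := by
  unfold seenAt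
  rw [List.take_append_of_le_length (Nat.le_refl _), List.take_length]
  congr 1
  simp [List.getD]

theorem firsts_snoc (xs : List String) (x : String) :
    firsts (xs ++ [x]) = firsts xs ++ (if x ∈ xs then [] else [(xs.length : Int)]) := by
  unfold firsts
  rw [List.length_append, List.length_singleton, idxFilter_snoc,
    idxFilter_congr xs.length (fun i hi => by rw [seenAt_append xs x i hi]),
    seenAt_last]
  by_cases hx : x ∈ xs <;> simp [hx]

theorem rowsOf_snoc (ls : List (List String)) (l : List String) :
    rowsOf (ls ++ [l]) = rowsOf ls ++ [pvIdx l 0] := by simp [rowsOf]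

theorem colsOf_snoc (ls : List (List String)) (l : List String) :
    colsOf (ls ++ [l]) = colsOf ls ++ [pvIdx l 1] := by simp [colsOf]

theorem uniteIdx_snoc (ls : List (List String)) (l : List String) :
    uniteIdx (ls ++ [l]) = uniteIdx ls ++
      (if pvIdx l 0 ∈ rowsOf ls ∧ pvIdx l 1 ∈ colsOf ls then [] else [(ls.length : Int)]) := by
  unfold uniteIdx
  have hr : (rowsOf ls).length = ls.length := by simp [rowsOf]
  have hc : (colsOf ls).length = ls.length := by simp [colsOf]
  rw [List.length_append, List.length_singleton, idxFilter_snoc, rowsOf_snoc, colsOf_snoc,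
    idxFilter_congr ls.length (fun i hi => by
      rw [seenAt_append _ _ i (by omega), seenAt_append _ _ i (by omega)]),
    show ls.length = (rowsOf ls).length from hr.symm, seenAt_last]
  rw [show (rowsOf ls).length = (colsOf ls).length from by omega, seenAt_last]
  by_cases h1 : pvIdx l 0 ∈ rowsOf ls <;> by_cases h2 : pvIdx l 1 ∈ colsOf ls <;>
    simp [h1, h2, hc]

theorem enumerate_snoc {α : Type} (xs : List α) (x : α) :
    ∀ s : Int, PySem.List.enumerate (xs ++ [x]) s = PySem.List.enumerate xs s ++ [(s + xs.length, x)] := by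
  induction xs with
  | nil => intro s; simp [PySem.List.enumerate_cons, PySem.List.enumerate_nil]
  | cons y ys ih =>
    intro s
    simp only [List.cons_append, PySem.List.enumerate_cons, ih (s + 1), List.length_cons]
    have h : s + 1 + (ys.length : Int) = s + ((ys.length + 1 : Nat) : Int) := by push_cast; ring
    rw [h]

theorem mid_sets (ls : List (List String)) :
    ∀ (a : Int) (S1 S2 : PySem.Set String),
      (ls.foldl midStep (a, S1, S2)).2
        = (PySem.Set.update S1 (rowsOf ls), PySem.Set.update S2 (colsOf ls)) := by
  induction ls with
  | nil => intro a S1 S2; simp [rowsOf, colsOf, PySem.Set.update_nil]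
  | cons l rest ih =>
    intro a S1 S2
    simp only [List.foldl_cons, midStep, rowsOf, colsOf, List.map_cons,
      PySem.Set.update_cons]
    exact ih _ _ _

-- setdefault loop: keys are the distinct key values, values are the first-occurrence indices
theorem sd_props (key : List String → String) (ls : List (List String)) :
    ((PySem.List.enumerate ls).foldl (fun d p => d.setdefault (key p.2) p.1)
        (PySem.Dict.empty : PySem.Dict String Int)).keys = PySem.Set.ofList (ls.map key)
    ∧ ((PySem.List.enumerate ls).foldl (fun d p => d.setdefault (key p.2) p.1)
        (PySem.Dict.empty : PySem.Dict String Int)).values = firsts (ls.map key) := by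
  induction ls using List.reverseRecOn with
  | nil => simp [PySem.List.enumerate_nil, firsts, idxFilter, PySem.Dict.values, PySem.Dict.empty]
  | append_singleton ls l ih =>
    obtain ⟨hk, hv⟩ := ih
    rw [enumerate_snoc ls l 0, List.foldl_append]
    set D := (PySem.List.enumerate ls).foldl (fun d p => d.setdefault (key p.2) p.1)
        (PySem.Dict.empty : PySem.Dict String Int) with hD
    simp only [List.foldl_cons, List.foldl_nil, List.map_append, List.map_cons, List.map_nil,
      zero_add]
    have hcont : D.contains (key l) = decide (key l ∈ ls.map key) := by
      rw [PySem.Dict.contains_eq_decide_mem_keys, hk]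
      simp [PySem.Set.mem_ofList]
    by_cases hm : key l ∈ ls.map key
    · rw [PySem.Dict.setdefault_of_contains _ _ (by rw [hcont]; simp [hm])]
      constructor
      · rw [hk, PySem.Set.ofList_append_singleton, PySem.Set.add_of_mem]
        rw [PySem.Set.mem_ofList]; exact hm
      · rw [hv, firsts_snoc, if_pos hm, List.append_nil]
    · rw [PySem.Dict.setdefault_of_not_contains _ _ (by rw [hcont]; simp [hm])]
      constructor
      · rw [PySem.Dict.keys_insert_of_not_contains _ _ (by rw [hcont]; simp [hm]), hk,
          PySem.Set.ofList_append_singleton,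
          PySem.Set.add_of_not_mem (by rw [PySem.Set.mem_ofList]; exact hm)]
      · have hitems := PySem.Dict.items_insert_of_not_contains D (k := key l)
          ((ls.length : Int)) (by rw [hcont]; simp [hm])
        have hvals : (D.insert (key l) ((ls.length : Int))).values
            = D.values ++ [(ls.length : Int)] := by
          simp [PySem.Dict.values, hitems]
        rw [hvals, hv, firsts_snoc, if_neg hm]
        simp

theorem nodup_firsts (xs : List String) : (firsts xs).Nodup := nodup_idxFilter _ _

theorem len_union_eq_uniteIdx (ls : List (List String)) :
    PySem.Set.len (PySem.Set.union (firsts (rowsOf ls)) (firsts (colsOf ls)))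
      = ((uniteIdx ls).length : Int) := by
  have hr : (rowsOf ls).length = ls.length := by simp [rowsOf]
  have hc : (colsOf ls).length = ls.length := by simp [colsOf]
  have hperm : (PySem.Set.union (firsts (rowsOf ls)) (firsts (colsOf ls))).Perm (uniteIdx ls) := by
    refine (List.perm_ext_iff_of_nodup
      (PySem.Set.nodup_union _ _ (nodup_idxFilter _ _)) (nodup_idxFilter _ _)).2 ?_
    intro x
    rw [PySem.Set.mem_union]
    simp only [firsts]
    rw [mem_idxFilter, mem_idxFilter, mem_idxFilter, hr, hc]
    constructor
    · rintro (⟨i, hi, hq, rfl⟩ | ⟨i, hi, hq, rfl⟩) <;>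
        exact ⟨i, hi, by simp_all, rfl⟩
    · rintro ⟨i, hi, hq, rfl⟩
      simp only [Bool.not_and, Bool.or_eq_true, Bool.not_eq_true'] at hq
      rcases hq with h | h
      · exact Or.inl ⟨i, hi, by simp [h], rfl⟩
      · exact Or.inr ⟨i, hi, by simp [h], rfl⟩
  simp [PySem.Set.len, hperm.length_eq]

theorem mid_eq_complement (ls : List (List String)) :
    (ls.foldl midStep (0, PySem.Set.empty, PySem.Set.empty)).1
      = (ls.length : Int) - ((uniteIdx ls).length : Int) := by
  induction ls using List.reverseRecOn with
  | nil => simp [uniteIdx, idxFilter]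
  | append_singleton ls l ih =>
    rw [List.foldl_append]
    have hsets := mid_sets ls 0 PySem.Set.empty PySem.Set.empty
    have hstate : ls.foldl midStep (0, PySem.Set.empty, PySem.Set.empty)
        = ((ls.foldl midStep (0, PySem.Set.empty, PySem.Set.empty)).1,
           PySem.Set.update PySem.Set.empty (rowsOf ls),
           PySem.Set.update PySem.Set.empty (colsOf ls)) := by
      rw [← hsets]
    rw [hstate]
    simp only [List.foldl_cons, List.foldl_nil, midStep]
    have hmem1 : (pvIdx l 0 ∈ PySem.Set.update PySem.Set.empty (rowsOf ls)) ↔ pvIdx l 0 ∈ rowsOf ls := by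
      rw [PySem.Set.mem_update]; simp [PySem.Set.empty]
    have hmem2 : (pvIdx l 1 ∈ PySem.Set.update PySem.Set.empty (colsOf ls)) ↔ pvIdx l 1 ∈ colsOf ls := by
      rw [PySem.Set.mem_update]; simp [PySem.Set.empty]
    rw [uniteIdx_snoc]
    by_cases h : pvIdx l 0 ∈ rowsOf ls ∧ pvIdx l 1 ∈ colsOf ls
    · rw [if_pos (by rw [hmem1, hmem2]; exact h), if_pos h]
      simp only [List.append_nil, List.length_append, List.length_singleton]
      push_cast
      omega
    · rw [if_neg (by rw [hmem1, hmem2]; exact h), if_neg h]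
      simp only [List.length_append, List.length_singleton]
      push_cast
      omega

-- ===== VERDICT (by name: the statement is the Claim_ definition above) =====
theorem solve_spec : Claim_equal_solve := by
  intro n ls _ _
  unfold Spec_solve solve solve_alt
  dsimp only
  rw [PySem.List.foldl_prod_mk
    (fun (d : PySem.Dict String Int) (p : Int × List String) => d.setdefault (pvIdx p.2 0) p.1)
    (fun (d : PySem.Dict String Int) (p : Int × List String) => d.setdefault (pvIdx p.2 1) p.1)]
  have h1 := sd_props (fun l => pvIdx l 0) ls
  have h2 := sd_props (fun l => pvIdx l 1) ls
  rw [pv_loop_eq ls ls [] 0 PySem.Dict.empty PySem.Dict.empty PySem.Set.empty PySem.Set.empty rfl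
      (by simp) (by simp [PySem.Set.empty]) (by simp) (by simp [PySem.Set.empty]),
    mid_eq_complement]
  rw [h1.2, h2.2,
    PySem.Set.ofList_eq_self_of_nodup _ (nodup_firsts (List.map (fun l => pvIdx l 0) ls)),
    PySem.Set.ofList_eq_self_of_nodup _ (nodup_firsts (List.map (fun l => pvIdx l 1) ls))]
  rw [show ls.map (fun l => pvIdx l 0) = rowsOf ls from rfl,
      show ls.map (fun l => pvIdx l 1) = colsOf ls from rfl,
      len_union_eq_uniteIdx]
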